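-- pv_equiv track=rewrite | github.com/bananadado/Project-Euler | 042 - Coded triangle numbers.py | isTriangularWord
-- ===== SOURCE A (Python) =====
-- from itertools import count
--
-- def isTriangularWord(word):
--     wordNum = sum([ord(l)-64 for l in word])
--     # now we iterate through the triangle numbers
--     t = 0
--     for i in count():
--         t += i
--         if t > wordNum:
--             return False
--         if t == wordNum:
--             return True
-- ===== SOURCE B (Python) =====
-- def isTriangularWord(word):
--     n = sum(ord(c) - 64 for c in word)
--     if n < 0:
--         return False
--     m = 8 * n + 1
--     # binary search for floor(sqrt(m)); n is triangular iff 8n+1 is a perfect square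
--     lo, hi = 0, m
--     while lo < hi:
--         mid = (lo + hi + 1) // 2
--         if mid * mid <= m:
--             lo = mid
--         else:
--             hi = mid - 1
--     return lo * lo == m
-- ===== Notes on version B (the rewrite author's own statement) =====
-- stated objective: alternative
-- what changed: Replaces the linear scan over successive triangular numbers with the perfect-square test on 8n+1 (integer square root by binary search); overall runtime is dominated by summing the letters, so wall-clock is similar.
import Mathlib
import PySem

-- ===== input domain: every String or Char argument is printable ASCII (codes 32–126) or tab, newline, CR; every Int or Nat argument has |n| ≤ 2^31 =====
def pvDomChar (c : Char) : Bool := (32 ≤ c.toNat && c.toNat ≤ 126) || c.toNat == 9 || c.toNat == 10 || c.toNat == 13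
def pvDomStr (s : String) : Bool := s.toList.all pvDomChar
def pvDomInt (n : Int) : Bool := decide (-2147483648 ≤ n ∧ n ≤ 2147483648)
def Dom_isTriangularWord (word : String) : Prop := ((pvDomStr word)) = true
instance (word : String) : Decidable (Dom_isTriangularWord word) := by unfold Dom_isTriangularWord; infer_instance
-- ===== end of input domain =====

-- B replaces A's linear walk through triangular numbers by the perfect-square test on 8n+1 (integer sqrt by binary search); return values are identical.

-- ===== PORT A =====
-- A's 'for i in count(): t += i; …' loop, step for step (i is the count() index, t the running
-- triangular sum; fuel is only a totality guard — it is chosen large enough to never run out)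
def triLoopA (fuel : Nat) (w : Int) (i : Nat) (t : Int) : Bool :=
  match fuel with
  | 0 => false
  | fuel + 1 =>
    let t' := t + i
    if t' > w then false
    else if t' = w then true
    else triLoopA fuel w (i + 1) t'

def isTriangularWord (word : String) : Bool :=
  let wordNum := ((word.toList.map (fun c => (c.toNat : Int) - 64)).sum)
  triLoopA (wordNum.toNat + 1) wordNum 0 0

-- ===== PORT B =====
-- Source B's while-loop: binary search for floor(sqrt m) on [lo, hi]; fuel is only a totality guard
def bsLoop (fuel : Nat) (m lo hi : Int) : Int :=
  match fuel with
  | 0 => lo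
  | fuel + 1 =>
    if lo < hi then
      let mid := PySem.Int.floordiv (lo + hi + 1) 2
      if mid * mid ≤ m then bsLoop fuel m mid hi else bsLoop fuel m lo (mid - 1)
    else lo

def isTriangularWord_alt (word : String) : Bool :=
  let n := ((word.toList.map (fun c => (c.toNat : Int) - 64)).sum)
  if n < 0 then false
  else
    let m := 8 * n + 1
    let r := bsLoop m.toNat m 0 m
    decide (r * r = m)

-- ===== PRECONDITION & SPEC =====
def Spec_isTriangularWord (word : String) (out : Bool) : Prop := out = isTriangularWord_alt word
instance (word : String) (out : Bool) : Decidable (Spec_isTriangularWord word out) := by unfold Spec_isTriangularWord; infer_instance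

-- ===== CLAIM (what is proved, stated in full; the proofs are below) =====
def Claim_equal_isTriangularWord : Prop := ∀ (word : String), Dom_isTriangularWord word → Spec_isTriangularWord word (isTriangularWord word)

-- ===== LEMMAS AND PROOFS =====

-- A's loop returns true iff some triangular number T(k) with k ≥ i equals w
-- (invariant: 2t = i(i-1); the fuel bound guarantees the guard never fires)
theorem triLoopA_true_iff (fuel : Nat) : ∀ (w : Int) (i : Nat) (t : Int),
    2 * t = (i : Int) * ((i : Int) - 1) → w + 1 - t - (i : Int) ≤ (fuel : Int) →
    (triLoopA fuel w i t = true ↔ ∃ k : Nat, i ≤ k ∧ (k : Int) * ((k : Int) + 1) = 2 * w) := by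
  induction fuel with
  | zero =>
    intro w i t hinv hfuel
    simp only [triLoopA, Bool.false_eq_true, false_iff]
    rintro ⟨k, hik, hk⟩
    have hmono : (i : Int) * ((i : Int) + 1) ≤ (k : Int) * ((k : Int) + 1) := by
      have : (i : Int) ≤ (k : Int) := by exact_mod_cast hik
      nlinarith [Int.natCast_nonneg i, Int.natCast_nonneg k]
    have h2 : 2 * (t + (i : Int)) = (i : Int) * ((i : Int) + 1) := by nlinarith
    have hcast : (0 : Int) ≤ (i : Int) := Int.natCast_nonneg i
    -- fuel = 0 forces t + i > w, so T(i) > w and no k ≥ i fits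
    have hfuel' : w + 1 - t - (i : Int) ≤ 0 := by exact_mod_cast hfuel
    linarith
  | succ fuel ih =>
    intro w i t hinv hfuel
    rw [triLoopA]
    split_ifs with hgt heq
    · simp only [false_iff]
      rintro ⟨k, hik, hk⟩
      have hmono : (i : Int) * ((i : Int) + 1) ≤ (k : Int) * ((k : Int) + 1) := by
        have : (i : Int) ≤ (k : Int) := by exact_mod_cast hik
        nlinarith [Int.natCast_nonneg i, Int.natCast_nonneg k]
      have h2 : 2 * (t + (i : Int)) = (i : Int) * ((i : Int) + 1) := by nlinarith
      linarith
    · simp only [true_iff]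
      exact ⟨i, le_refl _, by nlinarith⟩
    · have hinv' : 2 * (t + i) = ((i + 1 : Nat) : Int) * (((i + 1 : Nat) : Int) - 1) := by
        push_cast; nlinarith
      have hfuel' : w + 1 - (t + (i : Int)) - ((i + 1 : Nat) : Int) ≤ (fuel : Int) := by
        push_cast at hfuel ⊢
        have : (0 : Int) ≤ (i : Int) := Int.natCast_nonneg i
        omega
      rw [ih w (i + 1) (t + i) hinv' hfuel']
      constructor
      · rintro ⟨k, hik, hk⟩; exact ⟨k, by omega, hk⟩
      · rintro ⟨k, hik, hk⟩
        refine ⟨k, ?_, hk⟩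
        rcases Nat.lt_or_ge i k with h | h
        · omega
        · exfalso
          have hki : k = i := by omega
          subst hki
          apply heq
          nlinarith

-- the binary search computes the floor square root (fuel ≥ hi - lo suffices)
theorem bsLoop_spec (fuel : Nat) : ∀ (m lo hi : Int), 0 ≤ lo → lo ≤ hi → lo * lo ≤ m → m < (hi + 1) * (hi + 1) →
    hi - lo ≤ (fuel : Int) →
    0 ≤ bsLoop fuel m lo hi ∧ bsLoop fuel m lo hi * bsLoop fuel m lo hi ≤ m ∧
      m < (bsLoop fuel m lo hi + 1) * (bsLoop fuel m lo hi + 1) := by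
  induction fuel with
  | zero =>
    intro m lo hi hlo0 hle hlosq hhisq hfuel
    have hEq : lo = hi := by omega
    exact ⟨hlo0, hlosq, by simp only [bsLoop]; exact hEq ▸ hhisq⟩
  | succ fuel ih =>
    intro m lo hi hlo0 hle hlosq hhisq hfuel
    rw [bsLoop]
    dsimp only
    split_ifs with hlt hmid
    · have h1 : lo + 1 ≤ PySem.Int.floordiv (lo + hi + 1) 2 :=
        (PySem.Int.le_floordiv_iff_mul_le (by omega)).2 (by omega)
      have h2 : PySem.Int.floordiv (lo + hi + 1) 2 < hi + 1 :=
        (PySem.Int.floordiv_lt_iff_lt_mul (by omega)).2 (by omega)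
      exact ih m _ hi (by omega) (by omega) hmid hhisq (by push_cast at hfuel ⊢; omega)
    · have h1 : lo + 1 ≤ PySem.Int.floordiv (lo + hi + 1) 2 :=
        (PySem.Int.le_floordiv_iff_mul_le (by omega)).2 (by omega)
      have h2 : PySem.Int.floordiv (lo + hi + 1) 2 < hi + 1 :=
        (PySem.Int.floordiv_lt_iff_lt_mul (by omega)).2 (by omega)
      have hmid' : m < PySem.Int.floordiv (lo + hi + 1) 2 * PySem.Int.floordiv (lo + hi + 1) 2 := not_le.1 hmid
      exact ih m lo _ hlo0 (by omega) hlosq (by nlinarith) (by push_cast at hfuel ⊢; omega)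
    · have hEq : lo = hi := le_antisymm hle (not_lt.1 hlt)
      exact ⟨hlo0, hlosq, hEq ▸ hhisq⟩

-- n is triangular iff 8n+1 is a perfect square: the bridge between the two algorithms
theorem tri_iff_square (w : Int) :
    (∃ k : Nat, (k : Int) * ((k : Int) + 1) = 2 * w) ↔ (0 ≤ w ∧ ∃ s : Int, 0 ≤ s ∧ s * s = 8 * w + 1) := by
  constructor
  · rintro ⟨k, hk⟩
    have hk0 : (0:Int) ≤ (k : Int) := Int.natCast_nonneg k
    refine ⟨by nlinarith, 2 * (k : Int) + 1, by omega, by nlinarith⟩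
  · rintro ⟨hw, s, hs0, hs⟩
    have hodd : s % 2 = 1 := by
      rcases Int.emod_two_eq s with h | h
      · exfalso
        obtain ⟨j, hj⟩ := Int.dvd_of_emod_eq_zero h
        have h4 : 4 * (j * j) = 8 * w + 1 := by nlinarith
        omega
      · exact h
    obtain ⟨j, hj⟩ : ∃ j : Int, s = 2 * j + 1 := ⟨(s - 1) / 2, by omega⟩
    have hj0 : 0 ≤ j := by omega
    refine ⟨j.toNat, ?_⟩
    have : (j.toNat : Int) = j := Int.toNat_of_nonneg hj0
    rw [this]
    nlinarith

-- ===== VERDICT (by name: the statement is the Claim_ definition above) =====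
theorem isTriangularWord_spec : Claim_equal_isTriangularWord := by
  intro word _
  unfold Spec_isTriangularWord isTriangularWord isTriangularWord_alt
  set w := ((word.toList.map (fun c => (c.toNat : Int) - 64)).sum) with hw
  simp only []
  rw [Bool.eq_iff_iff]
  rw [triLoopA_true_iff (w.toNat + 1) w 0 0 (by norm_num) (by omega)]
  simp only [Nat.zero_le, true_and]
  rw [tri_iff_square]
  by_cases hneg : w < 0
  · simp only [hneg, if_pos]
    simp only [iff_false, Bool.false_eq_true]
    omega
  · rw [not_lt] at hneg
    simp only [if_neg (not_lt.mpr hneg)]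
    have hspec := bsLoop_spec (8 * w + 1).toNat (8 * w + 1) 0 (8 * w + 1) le_rfl (by omega) (by omega)
      (by nlinarith) (by omega)
    set r := bsLoop (8 * w + 1).toNat (8 * w + 1) 0 (8 * w + 1) with hr
    obtain ⟨hr0, hrle, hrlt⟩ := hspec
    simp only [decide_eq_true_eq]
    constructor
    · rintro ⟨-, s, hs0, hs⟩
      have : r = s := by nlinarith
      rw [this]; exact hs
    · intro h
      exact ⟨hneg, r, hr0, h⟩
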